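-- pv_equiv track=rewrite | github.com/arabusov/MCGA | mbr/tmp/prototype_fat12.py | gen_fat12_rawtable1
-- ===== SOURCE A (Python) =====
-- def pair (x, y):
--     return (x % 0x100, (x // 0x100) + (y % 0x10)*0x10,
--         (y // 0x10))
--
-- def gen_fat12_rawtable1 (prg_lens):
--     fat12_table=[]
--     current_sector = 2
--     for i in prg_lens:
--         for j in range (i-1):
--             current_sector = current_sector + 1
--             fat12_table.append (current_sector)
--         current_sector = current_sector + 1
--         fat12_table.append (0xfff)
--     fat12_raw = []
--     for i in range (0, len (fat12_table), 2):
--         triple = pair (fat12_table[i], fat12_table[i+1])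
--         fat12_raw.append (triple[0])
--         fat12_raw.append (triple[1])
--         fat12_raw.append (triple[2])
--     if len(fat12_table) % 2 == 1:
--         triple = pair (fat12_table[-1], 0x000)
--         fat12_raw.append (triple[0])
--         fat12_raw.append (triple[1])
--         fat12_raw.append (triple[2])
--     return fat12_raw
-- ===== SOURCE B (Python) =====
-- def gen_fat12_rawtable1(prg_lens):
--     # Pass 1: boundary positions (last entry of each program's chain) and total entry count.
--     total = 0
--     ends = []
--     for i in prg_lens:
--         total += i if i >= 1 else 1
--         ends.append(total - 1)
--     ends = set(ends)
--     # Pass 2: flat table -- every non-boundary entry at position p is simply p + 3.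
--     table = [0xfff if p in ends else p + 3 for p in range(total)]
--     # Pad to an even number of entries, then pack uniformly (no special tail case).
--     if total % 2 == 1:
--         table.append(0x000)
--     raw = []
--     for k in range(len(table) // 2):
--         x = table[2 * k]
--         y = table[2 * k + 1]
--         raw.append(x % 0x100)
--         raw.append(x // 0x100 + (y % 0x10) * 0x10)
--         raw.append(y // 0x10)
--     return raw
-- ===== Notes on version B (the rewrite author's own statement) =====
-- stated objective: alternative
-- what changed: Replaces A's nested sector-counter loops and step-2 index loop with a special odd-tail branch by precomputing the boundary (end-of-chain) positions, building the table as a flat position->value map (p+3 unless a boundary), padding to even length and packing with one uniform loop over pairs.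
import Mathlib
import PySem

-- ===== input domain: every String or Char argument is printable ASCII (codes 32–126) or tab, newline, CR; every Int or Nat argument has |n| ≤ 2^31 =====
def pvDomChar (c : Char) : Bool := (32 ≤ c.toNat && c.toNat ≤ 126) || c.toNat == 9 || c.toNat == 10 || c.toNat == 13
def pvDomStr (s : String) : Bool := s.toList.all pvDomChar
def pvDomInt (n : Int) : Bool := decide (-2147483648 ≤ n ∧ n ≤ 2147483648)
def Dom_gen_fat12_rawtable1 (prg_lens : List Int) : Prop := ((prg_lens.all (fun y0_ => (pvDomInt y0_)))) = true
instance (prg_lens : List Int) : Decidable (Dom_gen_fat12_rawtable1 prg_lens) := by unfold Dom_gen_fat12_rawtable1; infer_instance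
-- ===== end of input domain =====

-- B replaces A's nested sector-counter loops and special odd-tail packing branch by:
-- (1) precomputed end-of-chain boundary positions, (2) a flat position→value map
-- (p+3 unless a boundary), (3) padding to even length and one uniform packing loop.
-- Objective: alternative decomposition (same asymptotic cost).

-- ===== PORT A =====
-- helper 'pair' of the Python module
def pvPair (x y : Int) : Int × Int × Int :=
  (PySem.Int.mod x 0x100, PySem.Int.floordiv x 0x100 + (PySem.Int.mod y 0x10) * 0x10,
   PySem.Int.floordiv y 0x10)

def gen_fat12_rawtable1 (prg_lens : List Int) : List Int :=
  let st := prg_lens.foldl (fun (st : List Int × Int) i =>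
      let st2 := (PySem.List.pyRange 0 (i-1) 1).foldl
        (fun (q : List Int × Int) _ => (q.1 ++ [q.2 + 1], q.2 + 1)) st
      (st2.1 ++ [0xfff], st2.2 + 1)) ([], 2)
  let t := st.1
  let raw := (PySem.List.pyRange 0 (t.length : Int) 2).foldl (fun r i =>
      -- fat12_table[i], fat12_table[i+1]: the latter raises IndexError when the
      -- table length is odd; exactly those inputs are excluded by Pre_.
      let x := PySem.List.pyGetD t i 0
      let y := PySem.List.pyGetD t (i+1) 0
      let tr := pvPair x y
      r ++ [tr.1, tr.2.1, tr.2.2]) []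
  if PySem.Int.mod (t.length : Int) 2 == 1 then
    let tr := pvPair (PySem.List.pyGetD t (-1) 0) 0
    raw ++ [tr.1, tr.2.1, tr.2.2]
  else raw

-- ===== PORT B =====
def gen_fat12_rawtable1_alt (prg_lens : List Int) : List Int :=
  let te := prg_lens.foldl (fun (s : Int × List Int) i =>
      let t := s.1 + (if 1 ≤ i then i else 1)
      (t, s.2 ++ [t - 1])) (0, [])
  let total := te.1
  let ends := PySem.Set.ofList te.2
  let table := (PySem.List.pyRange 0 total 1).map
      (fun p => if ends.contains p then 0xfff else p + 3)
  let table := if PySem.Int.mod total 2 == 1 then table ++ [0x000] else table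
  (PySem.List.pyRange 0 (PySem.Int.floordiv (table.length : Int) 2) 1).foldl (fun r k =>
      let x := PySem.List.pyGetD table (2*k) 0
      let y := PySem.List.pyGetD table (2*k + 1) 0
      r ++ [PySem.Int.mod x 0x100,
            PySem.Int.floordiv x 0x100 + (PySem.Int.mod y 0x10) * 0x10,
            PySem.Int.floordiv y 0x10]) []

-- ===== PRECONDITION & SPEC =====
-- A raises IndexError (fat12_table[i+1] past the end) exactly when the FAT table has an
-- odd number of entries, i.e. when the sum of per-program entry counts (i for i ≥ 1,
-- else 1) is odd; Pre_ excludes exactly those inputs.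
def Pre_gen_fat12_rawtable1 (prg_lens : List Int) : Prop :=
  (prg_lens.map (fun i => if 1 ≤ i then i else (1:Int))).sum % 2 = 0
instance (prg_lens : List Int) : Decidable (Pre_gen_fat12_rawtable1 prg_lens) := by
  unfold Pre_gen_fat12_rawtable1; infer_instance

def pvWitness_gen_fat12_rawtable1 : List Int := [2, 2]

def Spec_gen_fat12_rawtable1 (prg_lens : List Int) (out : List Int) : Prop := out = gen_fat12_rawtable1_alt prg_lens
instance (prg_lens : List Int) (out : List Int) : Decidable (Spec_gen_fat12_rawtable1 prg_lens out) := by unfold Spec_gen_fat12_rawtable1; infer_instance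

-- ===== CLAIM (what is proved, stated in full; the proofs are below) =====
def Claim_equal_gen_fat12_rawtable1 : Prop := ∀ (prg_lens : List Int), Dom_gen_fat12_rawtable1 prg_lens → Pre_gen_fat12_rawtable1 prg_lens → Spec_gen_fat12_rawtable1 prg_lens (gen_fat12_rawtable1 prg_lens)

-- ===== LEMMAS AND PROOFS =====

-- per-program entry count, as Nat and as the Int expression B computes
def pvW (i : Int) : Nat := (i - 1).toNat + 1
def pvWI (i : Int) : Int := if 1 ≤ i then i else 1
def pvCnt (l : List Int) : Int := (l.map pvWI).sum
def pvCntN (l : List Int) : Nat := (l.map pvW).sum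

lemma pvWI_eq (i : Int) : pvWI i = ((pvW i : Nat) : Int) := by
  unfold pvW pvWI; split <;> omega

lemma pvCnt_eq (l : List Int) : pvCnt l = ((pvCntN l : Nat) : Int) := by
  induction l with
  | nil => simp [pvCnt, pvCntN]
  | cons i r ih =>
    simp [pvCnt, pvCntN] at *
    rw [pvWI_eq]; omega

-- the FAT table, described per program: entries cs+1 … cs+n then 0xfff
def pvInc (cs : Int) (n : Nat) : List Int := (List.range n).map (fun (j : Nat) => cs + ((j : Int) + 1))
def pvBlocks (cs : Int) : List Int → List Int
  | [] => []
  | i :: r => pvInc cs (i - 1).toNat ++ 0xfff :: pvBlocks (cs + (((i - 1).toNat : Int) + 1)) r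

lemma pvInc_succ (cs : Int) (n : Nat) : pvInc cs (n + 1) = (cs + 1) :: pvInc (cs + 1) n := by
  unfold pvInc
  rw [List.range_succ_eq_map, List.map_cons, List.map_map]
  refine List.cons_eq_cons.mpr ⟨by norm_num, ?_⟩
  refine List.map_congr_left ?_
  intro j _
  simp only [Function.comp_apply, Nat.succ_eq_add_one]
  push_cast; ring

lemma pvInc_length (cs : Int) (n : Nat) : (pvInc cs n).length = n := by simp [pvInc]

lemma pvBlocks_length (cs : Int) (l : List Int) : (pvBlocks cs l).length = pvCntN l := by
  induction l generalizing cs with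
  | nil => simp [pvBlocks, pvCntN]
  | cons i r ih => simp [pvBlocks, pvCntN, pvInc_length, ih, pvW]; omega

-- A's inner loop appends s.2+1 … s.2+len
lemma pvInnerFold (L : List Int) (s : List Int × Int) :
    L.foldl (fun (q : List Int × Int) _ => (q.1 ++ [q.2 + 1], q.2 + 1)) s
      = (s.1 ++ pvInc s.2 L.length, s.2 + L.length) := by
  induction L generalizing s with
  | nil => simp [pvInc]
  | cons a L ih =>
    simp only [List.foldl_cons, ih, List.length_cons]
    rw [pvInc_succ]
    simp only [Prod.mk.injEq]
    exact ⟨by simp, by push_cast; ring⟩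

lemma pvStepEq (e : List Int × Int) :
    (let st2 := e
     (st2.1 ++ [(0xfff : Int)], st2.2 + 1)) = (e.1 ++ [0xfff], e.2 + 1) := rfl

-- A's outer loop builds pvBlocks
lemma pvFoldA (l : List Int) (t : List Int) (cs : Int) :
    l.foldl (fun (st : List Int × Int) i =>
      let st2 := (PySem.List.pyRange 0 (i-1) 1).foldl
        (fun (q : List Int × Int) _ => (q.1 ++ [q.2 + 1], q.2 + 1)) st
      (st2.1 ++ [0xfff], st2.2 + 1)) (t, cs)
      = (t ++ pvBlocks cs l, cs + pvCnt l) := by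
  induction l generalizing t cs with
  | nil => simp [pvBlocks, pvCnt]
  | cons i r ih =>
    rw [List.foldl_cons, pvStepEq, pvInnerFold, PySem.List.length_pyRange_one, sub_zero]
    rw [ih]
    simp only [Prod.mk.injEq]
    constructor
    · have harg : cs + (((i - 1).toNat : Int)) + 1 = cs + ((((i - 1).toNat : Int)) + 1) := by ring
      rw [harg]
      simp [pvBlocks]
    · have h2 : pvCnt (i :: r) = pvWI i + pvCnt r := by simp [pvCnt]
      rw [h2, pvWI_eq]
      unfold pvW; push_cast; ring

-- B's first loop: total and the strictly increasing list of boundary positions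
def pvEnds (b : Int) : List Int → List Int
  | [] => []
  | i :: r => (b + pvWI i - 1) :: pvEnds (b + pvWI i) r

lemma pvFoldB (l : List Int) (b : Int) (e : List Int) :
    l.foldl (fun (s : Int × List Int) i =>
      let t := s.1 + (if 1 ≤ i then i else 1)
      (t, s.2 ++ [t - 1])) (b, e)
      = (b + pvCnt l, e ++ pvEnds b l) := by
  induction l generalizing b e with
  | nil => simp [pvCnt, pvEnds]
  | cons i r ih =>
    simp only [List.foldl_cons, ih, Prod.mk.injEq]
    constructor
    · simp [pvCnt, pvWI]; ring
    · simp [pvEnds, pvWI]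

lemma pvWI_pos (i : Int) : 1 ≤ pvWI i := by unfold pvWI; split <;> omega

lemma pvCnt_nonneg (l : List Int) : 0 ≤ pvCnt l := by
  rw [pvCnt_eq]; positivity

lemma pvEnds_lb (l : List Int) (b x : Int) (hx : x ∈ pvEnds b l) : b ≤ x := by
  induction l generalizing b with
  | nil => simp [pvEnds] at hx
  | cons i r ih =>
    simp only [pvEnds, List.mem_cons] at hx
    have := pvWI_pos i
    rcases hx with h | h
    · omega
    · have := ih (b + pvWI i) h; omega

-- B's comprehension over positions equals A's per-program blocks
lemma pvTableB (l : List Int) (L : Int) :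
    (PySem.List.pyRange L (L + pvCnt l) 1).map
      (fun p => if (pvEnds L l).contains p then 0xfff else p + 3)
      = pvBlocks (L + 2) l := by
  induction l generalizing L with
  | nil =>
    have : L + pvCnt [] = L := by simp [pvCnt]
    rw [this, PySem.List.pyRange_one_eq_nil (le_refl L)]
    simp [pvBlocks]
  | cons i r ih =>
    have hw := pvWI_pos i
    have hc := pvCnt_nonneg r
    have hcnt : L + pvCnt (i :: r) = L + pvWI i + pvCnt r := by simp [pvCnt]; ring
    rw [hcnt, PySem.List.pyRange_one_append L (L + pvWI i) (L + pvWI i + pvCnt r)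
        (by omega) (by omega), List.map_append]
    have hsecond :
        (PySem.List.pyRange (L + pvWI i) (L + pvWI i + pvCnt r) 1).map
          (fun p => if (pvEnds L (i :: r)).contains p then 0xfff else p + 3)
        = pvBlocks (L + pvWI i + 2) r := by
      rw [← ih (L + pvWI i)]
      refine List.map_congr_left ?_
      intro p hp
      rw [PySem.List.mem_pyRange_one] at hp
      have hne : ((p == L + pvWI i - 1) : Bool) = false := by
        simp; omega
      simp only [pvEnds, List.contains_cons, hne, Bool.false_or]
    have hfirst :
        (PySem.List.pyRange L (L + pvWI i) 1).map
          (fun p => if (pvEnds L (i :: r)).contains p then 0xfff else p + 3)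
        = pvInc (L + 2) (i - 1).toNat ++ [0xfff] := by
      rw [PySem.List.pyRange_one_append L (L + pvWI i - 1) (L + pvWI i) (by omega) (by omega),
          List.map_append]
      have hsing : PySem.List.pyRange (L + pvWI i - 1) (L + pvWI i) 1 = [L + pvWI i - 1] := by
        rw [PySem.List.pyRange_one]
        have h1 : (L + pvWI i - (L + pvWI i - 1)).toNat = 1 := by omega
        rw [h1]
        simp
      congr 1
      · -- the non-boundary part: every position maps to p + 3
        have hmap :
            (PySem.List.pyRange L (L + pvWI i - 1) 1).map
              (fun p => if (pvEnds L (i :: r)).contains p then 0xfff else p + 3)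
            = (PySem.List.pyRange L (L + pvWI i - 1) 1).map (fun p => p + 3) := by
          refine List.map_congr_left ?_
          intro p hp
          rw [PySem.List.mem_pyRange_one] at hp
          have hne : ((p == L + pvWI i - 1) : Bool) = false := by simp; omega
          have hnm : ((pvEnds (L + pvWI i) r).contains p) = false := by
            simp only [List.contains_eq_mem, decide_eq_false_iff_not]
            intro hmem
            have := pvEnds_lb r (L + pvWI i) p hmem
            omega
          simp only [pvEnds, List.contains_cons, hne, Bool.false_or, hnm, if_neg Bool.false_ne_true]
        rw [hmap, PySem.List.pyRange_one]
        have hn : (L + pvWI i - 1 - L).toNat = (i - 1).toNat := by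
          unfold pvWI; split <;> omega
        rw [hn, List.map_map]
        unfold pvInc
        refine List.map_congr_left ?_
        intro j _; simp [Function.comp]; ring
      · rw [hsing]
        simp only [List.map_cons, List.map_nil, pvEnds, List.contains_cons]
        simp
    rw [hfirst, hsecond]
    have hcs : L + pvWI i + 2 = (L + 2) + (((i - 1).toNat : Int) + 1) := by
      rw [pvWI_eq]; unfold pvW; push_cast; ring
    rw [hcs]
    simp [pvBlocks]

-- packing: the common pairwise form
def pvTriple (x y : Int) : List Int :=
  [PySem.Int.mod x 0x100, PySem.Int.floordiv x 0x100 + (PySem.Int.mod y 0x10) * 0x10,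
   PySem.Int.floordiv y 0x10]

def pvPackRec : List Int → List Int
  | x :: y :: r => pvTriple x y ++ pvPackRec r
  | _ => []

lemma pvPackRec_eq (t : List Int) :
    (List.range (t.length / 2)).flatMap
      (fun k => pvTriple (t.getD (2*k) 0) (t.getD (2*k+1) 0)) = pvPackRec t := by
  induction t using pvPackRec.induct with
  | case1 x y r ih =>
    have hlen : (x :: y :: r).length / 2 = r.length / 2 + 1 := by simp; omega
    rw [hlen, List.range_succ_eq_map]
    simp only [List.flatMap_cons, List.flatMap_map]
    have hg : ∀ k : Nat,
        pvTriple ((x :: y :: r).getD (2*(k+1)) 0) ((x :: y :: r).getD (2*(k+1)+1) 0)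
        = pvTriple (r.getD (2*k) 0) (r.getD (2*k+1) 0) := by
      intro k
      have h1 : 2*(k+1) = (2*k) + 1 + 1 := by ring
      rw [h1]; simp
    simp only [Nat.succ_eq_add_one]
    rw [show (fun k => pvTriple ((x :: y :: r).getD (2*(k+1)) 0) ((x :: y :: r).getD (2*(k+1)+1) 0))
        = (fun k => pvTriple (r.getD (2*k) 0) (r.getD (2*k+1) 0)) from funext hg] at *
    rw [ih]
    simp [pvPackRec]
  | case2 t h =>
    cases t with
    | nil => simp [pvPackRec]
    | cons x t' =>
      cases t' with
      | nil => simp [pvPackRec]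
      | cons y r => exact absurd rfl (h x y r)

-- A's packing loop (even length)
lemma pvPackA (t : List Int) (hev : t.length % 2 = 0) :
    (PySem.List.pyRange 0 (t.length : Int) 2).foldl (fun r i =>
      let x := PySem.List.pyGetD t i 0
      let y := PySem.List.pyGetD t (i+1) 0
      let tr := pvPair x y
      r ++ [tr.1, tr.2.1, tr.2.2]) []
      = pvPackRec t := by
  have hlam : (fun (r : List Int) (i : Int) =>
      let x := PySem.List.pyGetD t i 0
      let y := PySem.List.pyGetD t (i+1) 0
      let tr := pvPair x y
      r ++ [tr.1, tr.2.1, tr.2.2])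
      = fun r i => r ++ pvTriple (PySem.List.pyGetD t i 0) (PySem.List.pyGetD t (i+1) 0) := by
    funext r i; simp [pvPair, pvTriple]
  rw [hlam, PySem.List.foldl_append_eq_flatMap, List.nil_append,
      PySem.List.pyRange_of_pos 0 (t.length : Int) (by norm_num)]
  have hcount : (if (0:Int) < (t.length : Int) then (((t.length : Int) - 0 + 2 - 1)/2).toNat else 0)
      = t.length / 2 := by split <;> omega
  rw [hcount, List.flatMap_map]
  rw [← pvPackRec_eq t]
  refine List.flatMap_congr ?_
  intro k _
  have h1 : (0 : Int) + 2 * (k : Int) = ((2*k : Nat) : Int) := by push_cast; ring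
  have h2 : ((2*k : Nat) : Int) + 1 = ((2*k+1 : Nat) : Int) := by push_cast; ring
  simp only [h1, h2, PySem.List.pyGetD_natCast]

-- B's packing loop
lemma pvPackB (t : List Int) :
    (PySem.List.pyRange 0 (PySem.Int.floordiv (t.length : Int) 2) 1).foldl (fun r k =>
      let x := PySem.List.pyGetD t (2*k) 0
      let y := PySem.List.pyGetD t (2*k + 1) 0
      r ++ [PySem.Int.mod x 0x100,
            PySem.Int.floordiv x 0x100 + (PySem.Int.mod y 0x10) * 0x10,
            PySem.Int.floordiv y 0x10]) []
      = pvPackRec t := by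
  have hlam : (fun (r : List Int) (k : Int) =>
      let x := PySem.List.pyGetD t (2*k) 0
      let y := PySem.List.pyGetD t (2*k + 1) 0
      r ++ [PySem.Int.mod x 0x100,
            PySem.Int.floordiv x 0x100 + (PySem.Int.mod y 0x10) * 0x10,
            PySem.Int.floordiv y 0x10])
      = fun r k => r ++ pvTriple (PySem.List.pyGetD t (2*k) 0) (PySem.List.pyGetD t (2*k+1) 0) := by
    funext r k; simp [pvTriple]
  have hdiv : PySem.Int.floordiv (t.length : Int) 2 = ((t.length / 2 : Nat) : Int) := by
    show Int.fdiv _ _ = _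
    rw [Int.fdiv_eq_ediv_of_nonneg _ (by norm_num : (0:Int) ≤ 2)]
    omega
  rw [hlam, PySem.List.foldl_append_eq_flatMap, List.nil_append, hdiv,
      PySem.List.pyRange_zero_natCast, List.flatMap_map]
  rw [← pvPackRec_eq t]
  refine List.flatMap_congr ?_
  intro k _
  have h1 : (2 : Int) * ((k : Nat) : Int) = ((2*k : Nat) : Int) := by push_cast; ring
  have h2 : ((2*k : Nat) : Int) + 1 = ((2*k+1 : Nat) : Int) := by push_cast; ring
  simp only [h1, h2, PySem.List.pyGetD_natCast]

lemma pvModFalse (n : Nat) (h : n % 2 = 0) :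
    (PySem.Int.mod ((n : Nat) : Int) 2 == 1) = false := by
  show (Int.fmod _ _ == _) = false
  rw [Int.fmod_eq_emod_of_nonneg _ (by norm_num)]
  simp; omega

-- ===== VERDICT (by name: the statement is the Claim_ definition above) =====
theorem gen_fat12_rawtable1_spec : Claim_equal_gen_fat12_rawtable1 := by
  intro l _ hpre
  have hpre' : pvCnt l % 2 = 0 := hpre
  have hcnt : pvCntN l % 2 = 0 := by
    have := pvCnt_eq l; omega
  unfold Spec_gen_fat12_rawtable1 gen_fat12_rawtable1 gen_fat12_rawtable1_alt
  simp only [pvFoldA, pvFoldB, List.nil_append, zero_add]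
  have hset : (fun p => if (PySem.Set.ofList (pvEnds 0 l)).contains p then (0xfff : Int) else p + 3)
      = (fun p => if (pvEnds 0 l).contains p then 0xfff else p + 3) := by
    funext p
    congr 1
    simp [List.contains_eq_mem, PySem.Set.mem_ofList]
  have htab : (PySem.List.pyRange 0 (pvCnt l) 1).map
      (fun p => if (pvEnds 0 l).contains p then 0xfff else p + 3) = pvBlocks 2 l := by
    have h := pvTableB l 0
    simp only [zero_add] at h
    exact h
  rw [hset, htab]
  have hlen := pvBlocks_length 2 l
  have hcondA : (PySem.Int.mod (((pvBlocks 2 l).length : Nat) : Int) 2 == 1) = false := by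
    rw [hlen]; exact pvModFalse _ hcnt
  have hcondB : (PySem.Int.mod (pvCnt l) 2 == 1) = false := by
    rw [pvCnt_eq l]; exact pvModFalse _ hcnt
  rw [hcondA, hcondB]
  simp only [Bool.false_eq_true, if_false]
  rw [pvPackA _ (by omega), pvPackB]
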